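-- pv_equiv track=rewrite | github.com/QSOLKCB/QEC | src/qec/analysis/graph_controllability.py | build_state_graph
-- ===== SOURCE A (Python) =====
-- from typing import Dict, Iterable, List, Optional, Set, Tuple
--
-- Graph = Dict[str, List[str]]
--
-- def build_state_graph(edges: Iterable[Tuple[str, str]]) -> Graph:
--     """Build a deterministic adjacency map from directed edges."""
--     adjacency: Dict[str, Set[str]] = {}
--
--     for src, dst in edges:
--         adjacency.setdefault(src, set())
--         adjacency.setdefault(dst, set())
--         adjacency[src].add(dst)
--
--     graph: Graph = {}
--     for node in sorted(adjacency.keys()):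
--         graph[node] = sorted(adjacency[node])
--
--     return graph
-- ===== SOURCE B (Python) =====
-- def build_state_graph(edges):
--     """Build a deterministic adjacency map from directed edges."""
--     edge_list = list(edges)
--     nodes = sorted({n for e in edge_list for n in e})
--     return {node: sorted({d for s, d in edge_list if s == node}) for node in nodes}
-- ===== Notes on version B (the rewrite author's own statement) =====
-- stated objective: simpler
-- what changed: Replaces the incrementally built dict-of-sets (setdefault per endpoint, then a second insertion loop over sorted keys) with a direct dict comprehension over the sorted node set, computing each node's successors by filtering the edge list.
import Mathlib
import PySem

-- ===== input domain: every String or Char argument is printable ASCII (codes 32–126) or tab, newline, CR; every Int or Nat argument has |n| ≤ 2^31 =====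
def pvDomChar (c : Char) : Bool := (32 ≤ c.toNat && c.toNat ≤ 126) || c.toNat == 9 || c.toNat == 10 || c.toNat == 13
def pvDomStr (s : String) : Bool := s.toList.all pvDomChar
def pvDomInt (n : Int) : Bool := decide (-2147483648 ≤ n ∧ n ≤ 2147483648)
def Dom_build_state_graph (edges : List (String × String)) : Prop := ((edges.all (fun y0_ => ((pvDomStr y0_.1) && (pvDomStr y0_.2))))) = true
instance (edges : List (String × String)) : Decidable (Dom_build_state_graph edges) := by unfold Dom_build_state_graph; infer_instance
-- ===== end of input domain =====

-- B replaces A's incrementally built dict of sets (setdefault per endpoint + second insertion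
-- loop over sorted keys) with a direct map over the sorted node set, filtering the edge list
-- per node: a simpler, differently-shaped pass (objective: simpler).


-- ===== PORT A =====
-- the body of A's first loop: setdefault(src), setdefault(dst), adjacency[src].add(dst)
def bsgStep (d : PySem.Dict String (PySem.Set String)) (e : String × String) :
    PySem.Dict String (PySem.Set String) :=
  let d := if (d.get? e.1).isSome then d else d.insert e.1 PySem.Set.empty
  let d := if (d.get? e.2).isSome then d else d.insert e.2 PySem.Set.empty
  d.modify e.1 PySem.Set.empty (fun s => s.add e.2)

def build_state_graph (edges : List (String × String)) : List (String × List String) :=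
  let adjacency : PySem.Dict String (PySem.Set String) := edges.foldl bsgStep ⟨[]⟩
  let graph : PySem.Dict String (List String) :=
    (PySem.List.sorted adjacency.keys id).foldl
      (fun g node => g.insert node (PySem.List.sorted (adjacency.getD node PySem.Set.empty) id))
      ⟨[]⟩
  graph.items

-- ===== PORT B =====
def build_state_graph_alt (edges : List (String × String)) : List (String × List String) :=
  let edge_list := edges
  let nodes := PySem.List.sorted (PySem.Set.ofList (edge_list.flatMap (fun e => [e.1, e.2]))) id
  nodes.map (fun node =>
    (node, PySem.List.sorted
      (PySem.Set.ofList ((edge_list.filter (fun e => e.1 == node)).map Prod.snd)) id))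

-- ===== PRECONDITION & SPEC =====
def Spec_build_state_graph (edges : List (String × String)) (out : List (String × List String)) : Prop := out = build_state_graph_alt edges
instance (edges : List (String × String)) (out : List (String × List String)) : Decidable (Spec_build_state_graph edges out) := by unfold Spec_build_state_graph; infer_instance

-- ===== CLAIM (what is proved, stated in full; the proofs are below) =====
def Claim_equal_build_state_graph : Prop := ∀ (edges : List (String × String)), Dom_build_state_graph edges → Spec_build_state_graph edges (build_state_graph edges)

-- ===== LEMMAS AND PROOFS =====

-- node set of a prefix of edges, in first-occurrence order
def bsgNodes (es : List (String × String)) : PySem.Set String :=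
  PySem.Set.ofList (es.flatMap (fun e => [e.1, e.2]))

-- successors recorded for a key, in first-occurrence order
def bsgSucc (es : List (String × String)) (k : String) : PySem.Set String :=
  PySem.Set.ofList ((es.filter (fun e => e.1 == k)).map Prod.snd)

-- full characterisation of A's adjacency dict after processing es
def bsgSpecItems (es : List (String × String)) : List (String × PySem.Set String) :=
  (bsgNodes es).map (fun k => (k, bsgSucc es k))

theorem set_ofList_append (xs ys : List String) :
    PySem.Set.ofList (xs ++ ys) = List.foldl PySem.Set.add (PySem.Set.ofList xs) ys := by
  simp [PySem.Set.ofList, List.foldl_append]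

theorem set_add_mem (s : PySem.Set String) (x : String) (h : x ∈ s) : s.add x = s := by
  simp [PySem.Set.add, h]

theorem set_add_not_mem (s : PySem.Set String) (x : String) (h : x ∉ s) :
    s.add x = s ++ [x] := by
  simp [PySem.Set.add, h]

theorem dict_get?_map (ks : List String) (f : String → PySem.Set String) (k : String) :
    PySem.Dict.get? ⟨ks.map (fun j => (j, f j))⟩ k =
      if k ∈ ks then some (f k) else none := by
  induction ks with
  | nil => simp [PySem.Dict.get?]
  | cons a t ih =>
    by_cases hak : a = k
    · subst hak; simp [PySem.Dict.get?]
    · have hb : (a == k) = false := by simp [hak]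
      simp only [List.map_cons, PySem.Dict.get?, List.find?_cons, hb] at ih ⊢
      rw [ih]
      simp [Ne.symm hak]

theorem dict_contains_map (ks : List String) (f : String → PySem.Set String) (k : String) :
    PySem.Dict.contains ⟨ks.map (fun j => (j, f j))⟩ k = decide (k ∈ ks) := by
  simp only [PySem.Dict.contains, List.any_map]
  induction ks with
  | nil => simp
  | cons a t ih =>
    by_cases h : a = k
    · simp [h, Function.comp]
    · have h1 : (a == k) = false := by simp [h]
      have h2 : decide (k = a) = false := by simp [Ne.symm h]
      simp [Function.comp, h1, h2, ih]

theorem dict_insert_absent (ks : List String) (f : String → PySem.Set String) (k : String)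
    (v : PySem.Set String) (h : k ∉ ks) :
    PySem.Dict.insert ⟨ks.map (fun j => (j, f j))⟩ k v =
      ⟨ks.map (fun j => (j, f j)) ++ [(k, v)]⟩ := by
  simp [PySem.Dict.insert, h]

theorem dict_insert_present (ks : List String) (f : String → PySem.Set String) (k : String)
    (v : PySem.Set String) (h : k ∈ ks) :
    PySem.Dict.insert ⟨ks.map (fun j => (j, f j))⟩ k v =
      ⟨ks.map (fun j => (j, if j = k then v else f j))⟩ := by
  have hc : PySem.Dict.contains ⟨ks.map (fun j => (j, f j))⟩ k = true := by
    rw [dict_contains_map]; simpa using h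
  simp only [PySem.Dict.insert, hc, if_true, List.map_map]
  exact congrArg _ (List.map_congr_left (fun j _ => by
    by_cases hjk : j = k <;> simp [hjk]))

theorem bsgNodes_snoc (es : List (String × String)) (e : String × String) :
    bsgNodes (es ++ [e]) = PySem.Set.add (PySem.Set.add (bsgNodes es) e.1) e.2 := by
  simp [bsgNodes, set_ofList_append, List.foldl]

theorem bsgSucc_snoc (es : List (String × String)) (e : String × String) (k : String) :
    bsgSucc (es ++ [e]) k =
      if e.1 = k then PySem.Set.add (bsgSucc es k) e.2 else bsgSucc es k := by
  by_cases h : e.1 = k <;>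
    simp [bsgSucc, List.filter_append, h, set_ofList_append, List.foldl]

theorem bsgSucc_empty_of_not_mem (es : List (String × String)) (k : String)
    (h : k ∉ bsgNodes es) : bsgSucc es k = PySem.Set.empty := by
  have hnil : es.filter (fun e => e.1 == k) = [] := by
    rw [List.filter_eq_nil_iff]
    intro e he hbeq
    apply h
    rw [bsgNodes, PySem.Set.mem_ofList]
    simp only [List.mem_flatMap]
    exact ⟨e, he, by simp at hbeq; simp [hbeq]⟩
  simp [bsgSucc, hnil, PySem.Set.ofList, PySem.Set.empty]

theorem bsgStep_spec (es : List (String × String)) (e : String × String) :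
    bsgStep ⟨bsgSpecItems es⟩ e = ⟨bsgSpecItems (es ++ [e])⟩ := by
  obtain ⟨s, t⟩ := e
  unfold bsgStep bsgSpecItems
  simp only [bsgNodes_snoc, bsgSucc_snoc]
  by_cases hs : s ∈ bsgNodes es
  · rw [dict_get?_map]
    simp only [hs, if_pos, Option.isSome_some]
    by_cases ht : t ∈ bsgNodes es
    · rw [dict_get?_map]
      simp only [ht, if_pos, Option.isSome_some]
      rw [PySem.Dict.modify, PySem.Dict.getD, dict_get?_map]
      simp only [hs, if_pos, Option.getD_some]
      rw [dict_insert_present _ _ _ _ hs]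
      rw [set_add_mem _ _ hs, set_add_mem _ _ ht]
      refine congrArg _ (List.map_congr_left (fun j _ => ?_))
      by_cases hjs : j = s
      · subst hjs; simp
      · simp [hjs, Ne.symm hjs]
    · rw [dict_get?_map]
      simp only [ht, if_neg, not_false_iff, Option.isSome_none, Bool.false_eq_true]
      rw [dict_insert_absent _ _ _ _ ht]
      rw [set_add_mem _ _ hs, set_add_not_mem _ _ ht]
      have hmap : (bsgNodes es).map (fun k => (k, bsgSucc es k)) ++ [(t, PySem.Set.empty)] =
          ((bsgNodes es) ++ [t]).map (fun k => (k, bsgSucc es k)) := by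
        simp [bsgSucc_empty_of_not_mem es t ht]
      rw [hmap, PySem.Dict.modify, PySem.Dict.getD, dict_get?_map]
      have hs' : s ∈ bsgNodes es ++ [t] := List.mem_append_left _ hs
      simp only [hs', if_pos, Option.getD_some]
      rw [dict_insert_present _ _ _ _ hs']
      refine congrArg _ (List.map_congr_left (fun j hj => ?_))
      by_cases hjs : j = s
      · subst hjs; simp
      · simp [hjs, Ne.symm hjs]
  · rw [dict_get?_map]
    simp only [hs, if_neg, not_false_iff, Option.isSome_none, Bool.false_eq_true]
    rw [dict_insert_absent _ _ _ _ hs]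
    rw [set_add_not_mem _ _ hs]
    have hmap : (bsgNodes es).map (fun k => (k, bsgSucc es k)) ++ [(s, PySem.Set.empty)] =
        ((bsgNodes es) ++ [s]).map (fun k => (k, bsgSucc es k)) := by
      simp [bsgSucc_empty_of_not_mem es s hs]
    rw [hmap]
    by_cases ht : t ∈ bsgNodes es ++ [s]
    · rw [dict_get?_map]
      simp only [ht, if_pos, Option.isSome_some]
      rw [set_add_mem _ _ ht]
      rw [PySem.Dict.modify, PySem.Dict.getD, dict_get?_map]
      have hs' : s ∈ bsgNodes es ++ [s] := List.mem_append_right _ (by simp)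
      simp only [hs', if_pos, Option.getD_some]
      rw [dict_insert_present _ _ _ _ hs']
      refine congrArg _ (List.map_congr_left (fun j hj => ?_))
      by_cases hjs : j = s
      · subst hjs; simp
      · simp [hjs, Ne.symm hjs]
    · rw [dict_get?_map]
      simp only [ht, if_neg, not_false_iff, Option.isSome_none, Bool.false_eq_true]
      rw [dict_insert_absent _ _ _ _ ht]
      rw [set_add_not_mem _ _ ht]
      have hmap2 : (bsgNodes es ++ [s]).map (fun k => (k, bsgSucc es k)) ++ [(t, PySem.Set.empty)] =
          ((bsgNodes es ++ [s]) ++ [t]).map (fun k => (k, bsgSucc es k)) := by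
        have htn : t ∉ bsgNodes es := fun h => ht (List.mem_append_left _ h)
        simp [bsgSucc_empty_of_not_mem es t htn]
      rw [hmap2, PySem.Dict.modify, PySem.Dict.getD, dict_get?_map]
      have hs' : s ∈ (bsgNodes es ++ [s]) ++ [t] :=
        List.mem_append_left _ (List.mem_append_right _ (by simp))
      simp only [hs', if_pos, Option.getD_some]
      rw [dict_insert_present _ _ _ _ hs']
      refine congrArg _ (List.map_congr_left (fun j hj => ?_))
      by_cases hjs : j = s
      · subst hjs; simp
      · simp [hjs, Ne.symm hjs]

theorem bsgFold_spec (edges : List (String × String)) :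
    ∀ es₀, edges.foldl bsgStep ⟨bsgSpecItems es₀⟩ = ⟨bsgSpecItems (es₀ ++ edges)⟩ := by
  induction edges with
  | nil => intro es₀; simp
  | cons e t ih =>
    intro es₀
    simp only [List.foldl_cons, bsgStep_spec]
    rw [ih (es₀ ++ [e])]
    simp

theorem bsg_fold_insert (ks : List String) :
    ∀ (acc : PySem.Dict String (List String)) (f : String → List String),
      ks.Nodup →
      (∀ k ∈ ks, acc.contains k = false) →
      (ks.foldl (fun g node => g.insert node (f node)) acc).items =
        acc.items ++ ks.map (fun node => (node, f node)) := by
  induction ks with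
  | nil => intro acc f _ _; simp
  | cons a t ih =>
    intro acc f hnd h
    simp only [List.foldl_cons]
    have hins : (acc.insert a (f a)) = ⟨acc.items ++ [(a, f a)]⟩ := by
      simp [PySem.Dict.insert, h a (by simp)]
    rw [hins, ih _ f hnd.of_cons ?_]
    · simp
    · intro k hk
      have h1 := h k (List.mem_cons_of_mem _ hk)
      simp only [PySem.Dict.contains, List.any_append, List.any_cons, List.any_nil] at h1 ⊢
      simp only [h1, Bool.false_or, Bool.or_false]
      have hka : k ≠ a := fun h' => (List.nodup_cons.mp hnd).1 (h' ▸ hk)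
      simp [Ne.symm hka]

theorem bsg_nodup_nodes (es : List (String × String)) : (bsgNodes es).Nodup :=
  PySem.Set.nodup_ofList _

-- ===== VERDICT (by name: the statement is the Claim_ definition above) =====
theorem build_state_graph_spec : Claim_equal_build_state_graph := by
  intro edges _
  unfold Spec_build_state_graph
  simp only [build_state_graph, build_state_graph_alt]
  have hadj : edges.foldl bsgStep ⟨[]⟩ = ⟨bsgSpecItems edges⟩ := by
    have := bsgFold_spec edges []
    simpa [bsgSpecItems, bsgNodes, bsgSucc, PySem.Set.ofList, PySem.Set.empty] using this
  rw [hadj]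
  have hkeys : PySem.Dict.keys (⟨bsgSpecItems edges⟩ : PySem.Dict String (PySem.Set String)) =
      bsgNodes edges := by
    have hc : ((fun x : String × PySem.Set String => x.1) ∘ fun k => (k, bsgSucc edges k)) = id := rfl
    simp [PySem.Dict.keys, bsgSpecItems, hc]
  rw [hkeys]
  have hsortnd : (PySem.List.sorted (bsgNodes edges) id).Nodup :=
    (PySem.List.sorted_perm (bsgNodes edges) id false).nodup_iff.mpr (bsg_nodup_nodes edges)
  rw [bsg_fold_insert _ ⟨[]⟩ _ hsortnd ?hdisj]
  · simp only [List.nil_append]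
    refine List.map_congr_left (fun node hnode => ?_)
    have hmem : node ∈ bsgNodes edges :=
      (PySem.List.sorted_perm (bsgNodes edges) id false).mem_iff.mp hnode
    rw [PySem.Dict.getD, bsgSpecItems, dict_get?_map, if_pos hmem]
    simp [bsgSucc]
  · intro k _
    simp [PySem.Dict.contains]
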